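-- pv_equiv track=rewrite | github.com/EmilioGalimberti/finalAED | practico/PARCIAL 2/90747_Galimberti_Emilio.py | problema_3
-- ===== SOURCE A (Python) =====
-- def es_vocal(caracter):
--     return caracter in "aeiouáéíóúAEIOUÁÉÍÓÚ"
--
-- def problema_3(texto):
--         cont_letras = 0
--         cont_vocales = 0
--         palabras_pto_3 = 0
--         for caracter in texto:
--             if caracter != " " and caracter != ".": #contador letra
--                 cont_letras += 1
--                 if cont_letras <= 3 and es_vocal(caracter):
--                     cont_vocales = cont_vocales+1
--             else:
--                 if cont_vocales == 2:
--                     palabras_pto_3 += 1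
--                 cont_letras = 0
--                 cont_vocales = 0
--         return palabras_pto_3
-- ===== SOURCE B (Python) =====
-- import re
--
-- def problema_3(texto):
--     vocales = "aeiouáéíóúAEIOUÁÉÍÓÚ"
--     palabras = re.split(r'[ .]', texto)[:-1]
--     return sum(1 for w in palabras
--                if sum(c in vocales for c in w[:3]) == 2)
-- ===== Notes on version B (the rewrite author's own statement) =====
-- stated objective: idiomatic
-- what changed: Replaces A's three-counter character-state machine with re.split on the delimiters ' '/'.' (dropping the last, unterminated field) and a sum over the fields with exactly two vowels in their first three characters.
import Mathlib
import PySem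

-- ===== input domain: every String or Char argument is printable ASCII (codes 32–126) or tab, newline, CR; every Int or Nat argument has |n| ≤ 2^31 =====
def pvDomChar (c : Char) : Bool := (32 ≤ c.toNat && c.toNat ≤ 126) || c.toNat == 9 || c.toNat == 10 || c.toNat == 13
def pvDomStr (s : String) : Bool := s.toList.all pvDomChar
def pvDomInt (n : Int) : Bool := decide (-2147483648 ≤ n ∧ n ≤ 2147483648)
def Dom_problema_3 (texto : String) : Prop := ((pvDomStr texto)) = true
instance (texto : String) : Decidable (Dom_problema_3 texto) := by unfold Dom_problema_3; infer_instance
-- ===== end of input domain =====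

-- B replaces A's three-counter character-state machine by re.split on the delimiters ' '/'.'
-- (dropping the last, unterminated field) and counting the fields with exactly two vowels
-- among their first three letters (objective: idiomatic).

-- ===== PORT A =====
def esVocal (caracter : Char) : Bool :=
  "aeiouáéíóúAEIOUÁÉÍÓÚ".toList.contains caracter

def problema_3 (texto : String) : Int :=
  (texto.toList.foldl
    (fun (st : Int × Int × Int) caracter =>
      let cont_letras := st.1
      let cont_vocales := st.2.1
      let palabras := st.2.2
      if caracter ≠ ' ' ∧ caracter ≠ '.' then
        let cont_letras := cont_letras + 1
        let cont_vocales :=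
          if cont_letras ≤ 3 ∧ esVocal caracter then cont_vocales + 1 else cont_vocales
        (cont_letras, cont_vocales, palabras)
      else
        (0, 0, if cont_vocales = 2 then palabras + 1 else palabras))
    (0, 0, 0)).2.2

-- ===== PORT B =====
def altVocales : List Char := "aeiouáéíóúAEIOUÁÉÍÓÚ".toList

-- hand-written port of re.split(r'[ .]', texto): exact for this single-character-class
-- pattern — every ' '/'.' separates fields (empty fields kept, the trailing field kept).
def altSplit (cur : List Char) : List Char → List (List Char)
  | [] => [cur]
  | c :: rest =>
    if c = ' ' ∨ c = '.' then cur :: altSplit [] rest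
    else altSplit (cur ++ [c]) rest

def problema_3_alt (texto : String) : Int :=
  (((altSplit [] texto.toList).dropLast).countP
    (fun w => (w.take 3).countP (fun c => altVocales.contains c) == 2) : Nat)

-- ===== PRECONDITION & SPEC =====
def Spec_problema_3 (texto : String) (out : Int) : Prop := out = problema_3_alt texto
instance (texto : String) (out : Int) : Decidable (Spec_problema_3 texto out) := by unfold Spec_problema_3; infer_instance

-- ===== CLAIM (what is proved, stated in full; the proofs are below) =====
def Claim_equal_problema_3 : Prop := ∀ (texto : String), Dom_problema_3 texto → Spec_problema_3 texto (problema_3 texto)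

-- ===== LEMMAS AND PROOFS =====

theorem altSplit_ne_nil (cur l : List Char) : altSplit cur l ≠ [] := by
  induction l generalizing cur with
  | nil => simp [altSplit]
  | cons c rest ih =>
    by_cases hd : c = ' ' ∨ c = '.' <;> simp [altSplit, hd, ih]

theorem problema_3_key (l w : List Char) (acc : Int) :
    (l.foldl
      (fun (st : Int × Int × Int) caracter =>
        let cont_letras := st.1
        let cont_vocales := st.2.1
        let palabras := st.2.2
        if caracter ≠ ' ' ∧ caracter ≠ '.' then
          let cont_letras := cont_letras + 1
          let cont_vocales :=
            if cont_letras ≤ 3 ∧ esVocal caracter then cont_vocales + 1 else cont_vocales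
          (cont_letras, cont_vocales, palabras)
        else
          (0, 0, if cont_vocales = 2 then palabras + 1 else palabras))
      ((w.length : Int), (((w.take 3).countP (fun c => altVocales.contains c) : Nat) : Int), acc)).2.2
    = acc + (((altSplit w l).dropLast).countP
        (fun w => (w.take 3).countP (fun c => altVocales.contains c) == 2) : Nat) := by
  induction l generalizing w acc with
  | nil => simp [altSplit]
  | cons c rest ih =>
    by_cases hd : c = ' ' ∨ c = '.'
    · have hne : ¬ (c ≠ ' ' ∧ c ≠ '.') := by tauto
      simp only [List.foldl_cons, if_neg hne, altSplit, if_pos hd]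
      rw [List.dropLast_cons_of_ne_nil (altSplit_ne_nil [] rest), List.countP_cons]
      by_cases h2 : (w.take 3).countP (fun c => altVocales.contains c) = 2
      · rw [if_pos (by exact_mod_cast h2)]
        have hb : ((w.take 3).countP (fun c => altVocales.contains c) == 2) = true := by
          simpa using h2
        rw [hb]
        have h' := ih [] (acc + 1)
        simp only [List.length_nil, List.take_nil, List.countP_nil, Nat.cast_zero] at h'
        rw [h']
        push_cast
        simp
        ring
      · rw [if_neg (by exact_mod_cast h2)]
        have hb : ((w.take 3).countP (fun c => altVocales.contains c) == 2) = false := by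
          simpa using h2
        rw [hb]
        have h' := ih [] acc
        simp only [List.length_nil, List.take_nil, List.countP_nil, Nat.cast_zero] at h'
        rw [h']
        simp
    · have hne : (c ≠ ' ' ∧ c ≠ '.') := by tauto
      simp only [List.foldl_cons, if_pos hne, altSplit, if_neg hd]
      have hvc : (((w ++ [c]).take 3).countP (fun c => altVocales.contains c) : Int)
          = (((w.take 3).countP (fun c => altVocales.contains c) : Nat) : Int)
            + (if (w.length : Int) + 1 ≤ 3 ∧ esVocal c then 1 else 0) := by
        rw [List.take_append]
        by_cases h3 : w.length < 3
        · have ht : ([c].take (3 - w.length)) = [c] :=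
            List.take_of_length_le (by simp; omega)
          rw [ht, List.countP_append]
          have hc1 : [c].countP (fun c => altVocales.contains c) =
              if esVocal c then 1 else 0 := by
            simp [List.countP_cons, esVocal, altVocales]
          rw [hc1]
          by_cases hv : esVocal c
          · rw [if_pos hv, if_pos ⟨by omega, hv⟩]; push_cast; ring
          · rw [if_neg hv, if_neg (by tauto)]; push_cast; ring
        · have ht : (3 - w.length) = 0 := by omega
          rw [ht]
          rw [if_neg (by intro ⟨h1, _⟩; omega)]
          simp
      have hstate : (if (w.length : Int) + 1 ≤ 3 ∧ esVocal c then
            (((w.take 3).countP (fun c => altVocales.contains c) : Nat) : Int) + 1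
          else (((w.take 3).countP (fun c => altVocales.contains c) : Nat) : Int))
          = (((w ++ [c]).take 3).countP (fun c => altVocales.contains c) : Nat) := by
        split_ifs with h
        · rw [hvc, if_pos h]
        · rw [hvc, if_neg h]; simp
      have e1 : ((w.length : Int) + 1) = ((w ++ [c]).length : Int) := by simp
      rw [hstate, e1]
      exact ih (w ++ [c]) acc

-- ===== VERDICT (by name: the statement is the Claim_ definition above) =====
theorem problema_3_spec : Claim_equal_problema_3 := by
  intro texto _
  unfold Spec_problema_3 problema_3 problema_3_alt
  simpa using problema_3_key texto.toList [] 0
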